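-- pv_equiv track=rewrite | github.com/pypi-data/pypi-mirror-74 | packages/xlist/xlist-0.0.10.tar.gz/xlist-0.0.10/xlist/pair.py | find_lst_ipair_when_fstltsnd
-- ===== SOURCE A (Python) =====
-- def find_lst_ipair_when_fstltsnd(arr):
--     lngth = len(arr)
--     for snd in range(lngth-1,0,-1):
--         fst = snd - 1
--         if(arr[fst]<arr[snd]):
--             return((fst,snd))
--         else:
--             pass
--     return(None)
-- ===== SOURCE B (Python) =====
-- def find_lst_ipair_when_fstltsnd(arr):
--     idx = [i for i in range(len(arr) - 1) if arr[i] < arr[i + 1]]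
--     if idx:
--         return (idx[-1], idx[-1] + 1)
--     return None
-- ===== Notes on version B (the rewrite author's own statement) =====
-- stated objective: alternative
-- what changed: Replaces the backward early-exit scan over indices with a forward collect-all pass (comprehension of all left-indices where arr[i] < arr[i+1]) followed by a separate select-last step.
import Mathlib
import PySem

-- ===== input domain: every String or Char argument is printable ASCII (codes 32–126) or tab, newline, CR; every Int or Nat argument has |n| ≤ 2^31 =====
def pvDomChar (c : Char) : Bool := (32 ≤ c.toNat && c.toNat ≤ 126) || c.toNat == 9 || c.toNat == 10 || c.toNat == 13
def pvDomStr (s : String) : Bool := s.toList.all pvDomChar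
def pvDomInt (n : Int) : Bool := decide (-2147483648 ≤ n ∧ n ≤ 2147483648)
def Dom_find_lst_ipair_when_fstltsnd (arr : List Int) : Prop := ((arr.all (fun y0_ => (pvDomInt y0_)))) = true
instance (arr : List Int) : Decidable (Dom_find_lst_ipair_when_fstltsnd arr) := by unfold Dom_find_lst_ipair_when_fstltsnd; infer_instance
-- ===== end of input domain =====

-- B replaces A's backward early-exit scan with a forward collect-all pass plus a select-last step (alternative decomposition, same cost).

-- ===== PORT A =====
-- A's for-loop over range(len-1, 0, -1) with early return
def pvALoop (arr : List Int) : List Int → Option (Int × Int)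
  | [] => none
  | snd :: rest =>
    let fst := snd - 1
    match PySem.List.pyGet? arr fst, PySem.List.pyGet? arr snd with
    | some x, some y => if x < y then some (fst, snd) else pvALoop arr rest
    | _, _ => none  -- IndexError (unreachable: snd in range(len-1,0,-1))

def find_lst_ipair_when_fstltsnd (arr : List Int) : Option (Int × Int) :=
  pvALoop arr (PySem.List.pyRange ((arr.length : Int) - 1) 0 (-1))

-- ===== PORT B =====
-- the comprehension's condition arr[i] < arr[i+1]
def pvBCond (arr : List Int) (i : Int) : Bool :=
  match PySem.List.pyGet? arr i, PySem.List.pyGet? arr (i + 1) with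
  | some x, some y => decide (x < y)
  | _, _ => false  -- IndexError (unreachable: i in range(len-1))

def find_lst_ipair_when_fstltsnd_alt (arr : List Int) : Option (Int × Int) :=
  let idx := (PySem.List.pyRange 0 ((arr.length : Int) - 1) 1).filter (pvBCond arr)
  match idx.getLast? with  -- idx[-1] when idx is non-empty
  | some i => some (i, i + 1)
  | none => none

-- ===== PRECONDITION & SPEC =====
def Spec_find_lst_ipair_when_fstltsnd (arr : List Int) (out : Option (Int × Int)) : Prop := out = find_lst_ipair_when_fstltsnd_alt arr
instance (arr : List Int) (out : Option (Int × Int)) : Decidable (Spec_find_lst_ipair_when_fstltsnd arr out) := by unfold Spec_find_lst_ipair_when_fstltsnd; infer_instance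

-- ===== CLAIM (what is proved, stated in full; the proofs are below) =====
def Claim_equal_find_lst_ipair_when_fstltsnd : Prop := ∀ (arr : List Int), Dom_find_lst_ipair_when_fstltsnd arr → Spec_find_lst_ipair_when_fstltsnd arr (find_lst_ipair_when_fstltsnd arr)

-- ===== LEMMAS AND PROOFS =====
lemma pv_key (arr : List Int) (m : Nat) (h : m < arr.length) :
    pvALoop arr (PySem.List.pyRange (m : Int) 0 (-1)) =
      (match ((PySem.List.pyRange 0 (m : Int) 1).filter (pvBCond arr)).getLast? with
       | some i => some (i, i + 1)
       | none => (none : Option (Int × Int))) := by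
  induction m with
  | zero => simp [PySem.List.pyRange_neg_one_eq_nil, PySem.List.pyRange_one_eq_nil, pvALoop]
  | succ m ih =>
    have hm : m < arr.length := Nat.lt_of_succ_lt h
    have hcons : PySem.List.pyRange ((m : Int) + 1) 0 (-1)
        = ((m : Int) + 1) :: PySem.List.pyRange (m : Int) 0 (-1) := by
      rw [PySem.List.pyRange_neg_one_cons (by positivity)]
      norm_num
    have hsucc : PySem.List.pyRange 0 ((m : Int) + 1) 1
        = PySem.List.pyRange 0 (m : Int) 1 ++ [(m : Int)] := by
      exact PySem.List.pyRange_one_succ_right (by positivity)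
    have hget1 : PySem.List.pyGet? arr (m : Int) = some arr[m] :=
      PySem.List.pyGet?_ofNat arr m hm
    have hget2 : PySem.List.pyGet? arr ((m : Int) + 1) = some arr[m + 1] := by
      have := PySem.List.pyGet?_ofNat arr (m + 1) h
      push_cast at this
      simpa using this
    push_cast
    rw [hcons, hsucc, List.filter_append]
    simp only [pvALoop, List.filter_cons, List.filter_nil]
    have hfst : (m : Int) + 1 - 1 = (m : Int) := by ring
    have hb : pvBCond arr (m : Int) = decide (arr[m] < arr[m + 1]) := by
      unfold pvBCond; rw [hget1, hget2]
    rw [hfst, hget1, hget2, hb]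
    by_cases hlt : arr[m] < arr[m + 1]
    · simp [hlt]
    · simp [hlt, ih hm]

-- ===== VERDICT (by name: the statement is the Claim_ definition above) =====
theorem find_lst_ipair_when_fstltsnd_spec : Claim_equal_find_lst_ipair_when_fstltsnd := by
  intro arr _
  unfold Spec_find_lst_ipair_when_fstltsnd find_lst_ipair_when_fstltsnd find_lst_ipair_when_fstltsnd_alt
  cases harr : arr.length with
  | zero =>
    have h0 : ((0 : Nat) : Int) - 1 = -1 := by norm_num
    rw [h0, PySem.List.pyRange_neg_one_eq_nil (by norm_num),
      PySem.List.pyRange_one_eq_nil (by norm_num)]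
    simp [pvALoop]
  | succ n =>
    have hn : n < arr.length := by omega
    have hcast : ((n + 1 : Nat) : Int) - 1 = (n : Int) := by push_cast; ring
    rw [hcast]
    exact pv_key arr n hn
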